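-- pv_equiv track=rewrite | github.com/pavankalyanpadala-programmer/multi-agent-support-platform | src/tools/kb_search.py | split_faq_blocks
-- ===== SOURCE A (Python) =====
-- from typing import List, Tuple
--
-- def split_faq_blocks(text: str) -> List[str]:
--     blocks = []
--     current = []
--     for line in text.splitlines():
--         if line.startswith("## "):  # new question
--             if current:
--                 blocks.append("\n".join(current).strip())
--                 current = []
--         current.append(line)
--     if current:
--         blocks.append("\n".join(current).strip())
--     return [b for b in blocks if b]
-- ===== SOURCE B (Python) =====
-- def split_faq_blocks(text):
--     lines = text.splitlines()
--     blocks = []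
--     i, n = 0, len(lines)
--     while i < n:
--         j = i + 1
--         while j < n and not lines[j].startswith("## "):
--             j += 1
--         blocks.append("\n".join(lines[i:j]).strip())
--         i = j
--     return [b for b in blocks if b]
-- ===== Notes on version B (the rewrite author's own statement) =====
-- stated objective: alternative
-- what changed: Replaces A's streaming blocks/current accumulator with an index-based scan: an outer loop that, from each block start, scans forward to the next header line and slices the lines list between those positions directly, with no flush logic or running current list.
import Mathlib
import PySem

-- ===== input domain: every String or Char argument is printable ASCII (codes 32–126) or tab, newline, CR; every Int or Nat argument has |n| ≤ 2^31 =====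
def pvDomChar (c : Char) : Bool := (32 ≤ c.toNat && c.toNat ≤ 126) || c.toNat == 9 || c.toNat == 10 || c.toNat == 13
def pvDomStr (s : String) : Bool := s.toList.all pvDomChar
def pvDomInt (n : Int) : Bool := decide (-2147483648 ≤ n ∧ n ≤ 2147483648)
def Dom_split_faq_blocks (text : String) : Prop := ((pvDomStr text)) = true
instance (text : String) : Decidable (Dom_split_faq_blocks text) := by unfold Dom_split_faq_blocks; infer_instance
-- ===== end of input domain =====

-- B replaces A's streaming accumulator with an index scan that slices the line list between header positions (alternative decomposition, same cost).

-- ===== PORT A =====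
def pvHdr (line : String) : Bool := PySem.Str.startswith line "## "

def pvEmit (cur : List String) : String := PySem.Str.strip (PySem.Str.join "\n" cur)

-- one iteration of A's for-loop: maybe flush `current` into `blocks`, then append the line
def pvStepA (st : List String × List String) (line : String) : List String × List String :=
  let st' := if pvHdr line then (if st.2.isEmpty then st else (st.1 ++ [pvEmit st.2], [])) else st
  (st'.1, st'.2 ++ [line])

def split_faq_blocks (text : String) : List String :=
  let st := (PySem.Str.splitlines text).foldl pvStepA ([], [])
  let blocks := if st.2.isEmpty then st.1 else st.1 ++ [pvEmit st.2]
  blocks.filter (fun b => decide (b ≠ ""))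

-- ===== PORT B =====
-- inner while of Source B: first index j' ≥ j with lines[j'] a header (or len(lines));
-- lines[j] is always in range here, getD's default is never used
def pvNextHdr (lines : List String) (j : Nat) : Nat :=
  if j < lines.length then
    if pvHdr (lines.getD j "") then j else pvNextHdr lines (j + 1)
  else j
termination_by lines.length - j

theorem pvNextHdr_ge (lines : List String) (j : Nat) : j ≤ pvNextHdr lines j := by
  fun_induction pvNextHdr lines j with
  | case1 j _ _ => exact Nat.le_refl j
  | case2 j _ _ ih => omega
  | case3 j _ => exact Nat.le_refl j

-- outer while of Source B, building the blocks list
def pvOuterB (lines : List String) (i : Nat) : List String :=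
  if i < lines.length then
    pvEmit (PySem.List.slice lines (some (i : Int)) (some ((pvNextHdr lines (i + 1) : Nat) : Int))) ::
      pvOuterB lines (pvNextHdr lines (i + 1))
  else []
termination_by lines.length - i
decreasing_by have := pvNextHdr_ge lines (i + 1); omega

def split_faq_blocks_alt (text : String) : List String :=
  (pvOuterB (PySem.Str.splitlines text) 0).filter (fun b => decide (b ≠ ""))

-- ===== PRECONDITION & SPEC =====
def Spec_split_faq_blocks (text : String) (out : List String) : Prop := out = split_faq_blocks_alt text
instance (text : String) (out : List String) : Decidable (Spec_split_faq_blocks text out) := by unfold Spec_split_faq_blocks; infer_instance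

-- ===== CLAIM (what is proved, stated in full; the proofs are below) =====
def Claim_equal_split_faq_blocks : Prop := ∀ (text : String), Dom_split_faq_blocks text → Spec_split_faq_blocks text (split_faq_blocks text)

-- ===== LEMMAS AND PROOFS =====

-- common shape: the lines grouped at header lines (first group keeps any pre-header prefix)
def pvGroups : List String → List (List String)
  | [] => []
  | l :: ls => (l :: ls.takeWhile (fun s => !pvHdr s)) :: pvGroups (ls.dropWhile (fun s => !pvHdr s))
termination_by L => L.length
decreasing_by have := List.length_dropWhile_le (fun s => !pvHdr s) ls; simp; omega

theorem pvLen_takeWhile_le (p : String → Bool) (l : List String) :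
    (l.takeWhile p).length ≤ l.length := by
  induction l with
  | nil => simp
  | cons a l ih =>
    by_cases h : p a
    · simp [h]; omega
    · simp [h]

theorem pvTake_takeWhile (p : String → Bool) (l : List String) :
    l.take (l.takeWhile p).length = l.takeWhile p := by
  induction l with
  | nil => simp
  | cons a l ih => by_cases h : p a <;> simp [h, ih]

theorem pvDrop_takeWhile (p : String → Bool) (l : List String) :
    l.drop (l.takeWhile p).length = l.dropWhile p := by
  induction l with
  | nil => simp
  | cons a l ih => by_cases h : p a <;> simp [h, ih]

def pvFinishA (st : List String × List String) : List String :=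
  if st.2.isEmpty then st.1 else st.1 ++ [pvEmit st.2]

theorem pvFoldA_eq (L : List String) : ∀ (blocks cur : List String), cur ≠ [] →
    pvFinishA (L.foldl pvStepA (blocks, cur)) =
      blocks ++ ((cur ++ L.takeWhile (fun s => !pvHdr s)) :: pvGroups (L.dropWhile (fun s => !pvHdr s))).map pvEmit := by
  induction L with
  | nil => intro blocks cur hc; simp [pvFinishA, pvGroups, hc]
  | cons l ls ih =>
    intro blocks cur hc
    by_cases h : pvHdr l = true
    · have hstep : pvStepA (blocks, cur) l = (blocks ++ [pvEmit cur], [l]) := by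
        simp [pvStepA, h, hc]
      rw [List.foldl_cons, hstep, ih _ _ (by simp)]
      simp [pvGroups, h]
    · have hstep : pvStepA (blocks, cur) l = (blocks, cur ++ [l]) := by
        simp [pvStepA, h]
      rw [List.foldl_cons, hstep, ih _ _ (by simp [hc])]
      simp [h]

theorem pvA_eq_groups (L : List String) :
    pvFinishA (L.foldl pvStepA ([], [])) = (pvGroups L).map pvEmit := by
  cases L with
  | nil => simp [pvFinishA, pvGroups]
  | cons l ls =>
    have hstep : pvStepA ([], []) l = ([], [l]) := by
      by_cases h : pvHdr l = true <;> simp [pvStepA, h]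
    rw [List.foldl_cons, hstep, pvFoldA_eq ls [] [l] (by simp)]
    simp [pvGroups]

theorem pvNextHdr_eq (lines : List String) (j : Nat) (hj : j ≤ lines.length) :
    pvNextHdr lines j = j + ((lines.drop j).takeWhile (fun s => !pvHdr s)).length := by
  fun_induction pvNextHdr lines j with
  | case1 j hlt hh =>
    rw [List.drop_eq_getElem_cons hlt]
    rw [List.getD_eq_getElem lines "" hlt] at hh
    simp [hh]
  | case2 j hlt hh ih =>
    rw [List.getD_eq_getElem lines "" hlt] at hh
    have hh' : pvHdr lines[j] = false := by simpa using hh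
    rw [ih (by omega), List.drop_eq_getElem_cons hlt, List.takeWhile_cons, hh']
    simp
    omega
  | case3 j hge =>
    have : lines.drop j = [] := List.drop_eq_nil_of_le (by omega)
    simp [this]

theorem pvOuterB_eq (lines : List String) (i : Nat) (hi : i ≤ lines.length) :
    pvOuterB lines i = (pvGroups (lines.drop i)).map pvEmit := by
  fun_induction pvOuterB lines i with
  | case1 i hlt ih =>
    set p := (fun s => !pvHdr s) with hp
    have h1 : i + 1 ≤ lines.length := hlt
    set t := ((lines.drop (i + 1)).takeWhile p).length with ht
    have hnext : pvNextHdr lines (i + 1) = (i + 1) + t := pvNextHdr_eq lines (i + 1) h1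
    have htle : t ≤ lines.length - (i + 1) := by
      have := pvLen_takeWhile_le p (lines.drop (i + 1))
      simpa using this
    have hslice : PySem.List.slice lines (some (i : Int)) (some ((pvNextHdr lines (i + 1) : Nat) : Int)) =
        lines[i] :: (lines.drop (i + 1)).takeWhile p := by
      rw [PySem.List.slice_natCast, hnext]
      have : (i + 1) + t - i = t + 1 := by omega
      rw [this, List.drop_eq_getElem_cons hlt, List.take_succ_cons]
      congr 1
      exact pvTake_takeWhile ..
    have hdropw : (lines.drop (i + 1)).dropWhile p = lines.drop ((i + 1) + t) := by
      have h := pvDrop_takeWhile p (lines.drop (i + 1))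
      rw [List.drop_drop] at h
      rw [← ht] at h
      exact h.symm
    rw [ih (by omega)]
    rw [List.drop_eq_getElem_cons hlt]
    simp only [pvGroups, List.map_cons]
    rw [hslice, hnext, ← hdropw]
    rw [hp]
    rfl
  | case2 i hge =>
    have : lines.drop i = [] := List.drop_eq_nil_of_le (by omega)
    simp [this, pvGroups]

-- ===== VERDICT (by name: the statement is the Claim_ definition above) =====
theorem split_faq_blocks_spec : Claim_equal_split_faq_blocks := by
  intro text _
  unfold Spec_split_faq_blocks split_faq_blocks split_faq_blocks_alt
  rw [pvOuterB_eq _ 0 (Nat.zero_le _)]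
  have := pvA_eq_groups (PySem.Str.splitlines text)
  simp only [pvFinishA] at this
  simp only [List.drop_zero, this]
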